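-- pv_equiv track=rewrite | github.com/adam-rumpf/english-words | word_rules.py | character_order
-- ===== SOURCE A (Python) =====
-- CONSONANTS = "bcdfghjklmnpqrstvwxyz"
--
-- VOWELS = "aeiou"
--
-- def character_order(w, vc=False):
--     """character_order(w[, vc]) -> bool
--     Determines whether a string contains a CV or VC pair.
--
--     Positional arguments:
--     w (str) -- input string to categorize
--
--     Keyword arguments:
--     [vc=False] (bool) -- False to check CV order, True to check for VC order
--
--     Returns:
--     (bool) -- True if the specified progression is present, False otherwise
--     """
--
--     # Immediately return False if too short
--     if len(w) < 2:
--         return False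
--
--     # Check for CV pairs
--     if vc == False:
--         fc = False # whether we've found a consonant
--         # Process each character
--         for c in w:
--             # Mark first found consonant
--             if c in CONSONANTS:
--                 fc = True
--             # Found vowel after consonant
--             elif fc == True:
--                 return True
--     # Check for VC pairs
--     else:
--         fv = False # whether we've found a vowel
--         # Process each character
--         for c in w:
--             # Mark first found cvowel
--             if c in VOWELS:
--                 fv = True
--             # Found consonant after vowel
--             elif fv == True:
--                 return True
--
--     # If no switch found, return False
--     return False
-- ===== SOURCE B (Python) =====
-- CONSONANTS = "bcdfghjklmnpqrstvwxyz"
--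
-- VOWELS = "aeiou"
--
-- def character_order(w, vc=False):
--     """Extrema comparison: a mark/non-mark adjacency-in-order pair exists
--     iff the first marker index precedes the last non-marker index."""
--     marks = VOWELS if vc else CONSONANTS
--     first_mark = None
--     last_other = None
--     for i, c in enumerate(w):
--         if c in marks:
--             if first_mark is None:
--                 first_mark = i
--         else:
--             last_other = i
--     return first_mark is not None and last_other is not None and first_mark < last_other
-- ===== Notes on version B (the rewrite author's own statement) =====
-- stated objective: alternative
-- what changed: Instead of a running found-a-marker flag with an early return, B records the first marker index and the last non-marker index in one pass and returns whether the first precedes the last.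
import Mathlib
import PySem

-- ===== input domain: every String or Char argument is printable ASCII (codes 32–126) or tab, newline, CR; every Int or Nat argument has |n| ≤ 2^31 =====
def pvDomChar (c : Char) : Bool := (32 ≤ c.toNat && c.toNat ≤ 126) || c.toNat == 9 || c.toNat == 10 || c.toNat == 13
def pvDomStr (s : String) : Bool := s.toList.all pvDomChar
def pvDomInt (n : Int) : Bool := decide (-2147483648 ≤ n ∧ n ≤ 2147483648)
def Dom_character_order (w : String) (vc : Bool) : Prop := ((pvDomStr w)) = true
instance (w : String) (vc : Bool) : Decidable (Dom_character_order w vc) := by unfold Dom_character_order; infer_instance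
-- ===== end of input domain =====

-- B replaces A's running-flag scan with a comparison of two positional extrema
-- (first marker index vs last non-marker index); alternative formulation, same cost.

-- ===== PORT A =====
def pvCONSONANTS : List Char := "bcdfghjklmnpqrstvwxyz".toList
def pvVOWELS : List Char := "aeiou".toList

-- the for-loop of A: flag f = "found a marker so far"; early return True becomes
-- returning true from the recursion
def loopA (marks : List Char) : List Char → Bool → Bool
  | [], _ => false
  | c :: rest, f =>
    if marks.contains c then loopA marks rest true
    else if f then true
    else loopA marks rest f

def character_order (w : String) (vc : Bool) : Bool :=
  if w.toList.length < 2 then false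
  else if vc == false then loopA pvCONSONANTS w.toList false
  else loopA pvVOWELS w.toList false

-- ===== PORT B =====
-- the for-loop of B: i is the current index, fm/lo the optional first-marker /
-- last-other indices; at the end compare them
def scanB (marks : List Char) : List Char → Nat → Option Nat → Option Nat → Bool
  | [], _, fm, lo =>
    match fm, lo with
    | some a, some b => decide (a < b)
    | _, _ => false
  | c :: rest, i, fm, lo =>
    if marks.contains c then
      scanB marks rest (i + 1) (if fm.isNone then some i else fm) lo
    else
      scanB marks rest (i + 1) fm (some i)

def character_order_alt (w : String) (vc : Bool) : Bool :=
  let marks := if vc then pvVOWELS else pvCONSONANTS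
  scanB marks w.toList 0 none none

-- ===== PRECONDITION & SPEC =====
def Spec_character_order (w : String) (vc : Bool) (out : Bool) : Prop := out = character_order_alt w vc
instance (w : String) (vc : Bool) (out : Bool) : Decidable (Spec_character_order w vc out) := by unfold Spec_character_order; infer_instance

-- ===== CLAIM (what is proved, stated in full; the proofs are below) =====
def Claim_equal_character_order : Prop := ∀ (w : String) (vc : Bool), Dom_character_order w vc → Spec_character_order w vc (character_order w vc)

-- ===== LEMMAS AND PROOFS =====

-- common characterisation: "some marker occurs strictly before some non-marker"
def pvSpec (marks : List Char) : List Char → Bool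
  | [] => false
  | c :: rest =>
    if marks.contains c then rest.any (fun d => !marks.contains d)
    else pvSpec marks rest

theorem pvSpec_any (marks : List Char) (cs : List Char)
    (h : cs.any (fun d => !marks.contains d) = false) : pvSpec marks cs = false := by
  induction cs with
  | nil => rfl
  | cons c rest ih =>
    simp only [List.any_cons, Bool.or_eq_false_iff] at h
    simp only [pvSpec]
    split
    · exact h.2
    · exact ih h.2

theorem loopA_true (marks : List Char) (cs : List Char) :
    loopA marks cs true = cs.any (fun d => !marks.contains d) := by
  induction cs with
  | nil => rfl
  | cons c rest ih =>
    simp only [loopA, List.any_cons]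
    by_cases h : marks.contains c = true
    · rw [if_pos h, ih, h, Bool.not_true, Bool.false_or]
    · have hc : marks.contains c = false := by
        cases hc : marks.contains c
        · rfl
        · exact absurd hc h
      rw [if_neg h, if_pos trivial, hc, Bool.not_false, Bool.true_or]

theorem loopA_false (marks : List Char) (cs : List Char) :
    loopA marks cs false = pvSpec marks cs := by
  induction cs with
  | nil => rfl
  | cons c rest ih =>
    simp only [loopA, pvSpec]
    by_cases h : marks.contains c = true
    · rw [if_pos h, if_pos h, loopA_true]
    · rw [if_neg h, if_neg Bool.false_ne_true, if_neg h, ih]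

-- the final comparison of B
def pvCmp : Option Nat → Option Nat → Bool
  | some a, some b => decide (a < b)
  | _, _ => false

theorem scanB_inv (marks : List Char) (cs : List Char) :
    ∀ (i : Nat) (fm lo : Option Nat),
    (∀ a, fm = some a → a < i) → (∀ b, lo = some b → b < i) →
    scanB marks cs i fm lo =
      if cs.any (fun d => !marks.contains d) then (fm.isSome || pvSpec marks cs)
      else pvCmp fm lo := by
  induction cs with
  | nil =>
    intro i fm lo _ _
    cases fm <;> cases lo <;> rfl
  | cons c rest ih =>
    intro i fm lo hfm hlo
    simp only [scanB, List.any_cons, pvSpec]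
    by_cases h : marks.contains c = true
    · -- marker: fm gets set if it was none
      rw [if_pos h, if_pos h, h, Bool.not_true, Bool.false_or]
      cases fm with
      | none =>
        rw [show (if (none : Option Nat).isNone then some i else none) = some i from rfl,
          ih (i + 1) (some i) lo (by intro a ha; injection ha with ha; omega)
            (fun b hb => Nat.lt_succ_of_lt (hlo b hb))]
        by_cases ha : rest.any (fun d => !marks.contains d) = true
        · rw [if_pos ha, if_pos ha, ha]; rfl
        · rw [if_neg ha, if_neg ha]
          cases lo with
          | none => rfl
          | some b =>
            have hb := hlo b rfl
            show decide (i < b) = false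
            exact decide_eq_false (by omega)
      | some a =>
        rw [show (if (some a : Option Nat).isNone then some i else some a) = some a from rfl,
          ih (i + 1) (some a) lo
            (by intro x hx; injection hx with hx; subst hx
                exact Nat.lt_succ_of_lt (hfm a rfl))
            (fun b hb => Nat.lt_succ_of_lt (hlo b hb))]
        by_cases ha : rest.any (fun d => !marks.contains d) = true
        · rw [if_pos ha, if_pos ha]; rfl
        · rw [if_neg ha, if_neg ha]
    · -- non-marker: lo becomes some i
      have hb : marks.contains c = false := by
        cases hc : marks.contains c
        · rfl
        · exact absurd hc h
      rw [if_neg h, if_neg h, hb, Bool.not_false, Bool.true_or, if_pos rfl,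
        ih (i + 1) fm (some i)
          (fun a ha => Nat.lt_succ_of_lt (hfm a ha))
          (by intro b hb'; injection hb' with hb'; omega)]
      by_cases ha : rest.any (fun d => !marks.contains d) = true
      · rw [if_pos ha]
      · rw [if_neg ha, pvSpec_any marks rest (by
          cases hx : rest.any (fun d => !marks.contains d)
          · rfl
          · exact absurd hx ha), Bool.or_false]
        cases fm with
        | none => rfl
        | some a =>
          show decide (a < i) = true
          exact decide_eq_true (hfm a rfl)

theorem alt_eq_pvSpec (marks : List Char) (cs : List Char) :
    scanB marks cs 0 none none = pvSpec marks cs := by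
  rw [scanB_inv marks cs 0 none none (by intro a h; cases h) (by intro b h; cases h)]
  split
  · simp
  · rename_i hany
    have := pvSpec_any marks cs (by simpa using hany)
    rw [this]; rfl

theorem pvSpec_short (marks : List Char) (cs : List Char) (h : cs.length < 2) :
    pvSpec marks cs = false := by
  match cs, h with
  | [], _ => rfl
  | [c], _ =>
    simp only [pvSpec]
    split <;> rfl

-- ===== VERDICT (by name: the statement is the Claim_ definition above) =====
theorem alt_false (w : String) :
    character_order_alt w false = pvSpec pvCONSONANTS w.toList := by
  rw [show character_order_alt w false
      = scanB pvCONSONANTS w.toList 0 none none from rfl, alt_eq_pvSpec]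

theorem alt_true (w : String) :
    character_order_alt w true = pvSpec pvVOWELS w.toList := by
  rw [show character_order_alt w true
      = scanB pvVOWELS w.toList 0 none none from rfl, alt_eq_pvSpec]

-- ===== VERDICT (by name: the statement is the Claim_ definition above) =====
theorem character_order_spec : Claim_equal_character_order := by
  intro w vc _
  unfold Spec_character_order
  cases vc with
  | false =>
    rw [show character_order w false
        = if w.toList.length < 2 then false else loopA pvCONSONANTS w.toList false from rfl,
      alt_false]
    by_cases hl : w.toList.length < 2
    · rw [if_pos hl, pvSpec_short _ _ hl]
    · rw [if_neg hl, loopA_false]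
  | true =>
    rw [show character_order w true
        = if w.toList.length < 2 then false else loopA pvVOWELS w.toList false from rfl,
      alt_true]
    by_cases hl : w.toList.length < 2
    · rw [if_pos hl, pvSpec_short _ _ hl]
    · rw [if_neg hl, loopA_false]
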